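-- pv_equiv track=rewrite | github.com/kodsnack/advent_of_code_2021 | jakobruhe-python/day20.py | solve
-- ===== SOURCE A (Python) =====
-- def get_output(x, y, back, image, algo):
--     s = 0
--     W, H = len(image[0]), len(image)
--     for i in range(9):
--         dx = i % 3 - 1
--         dy = i // 3 - 1
--         is_inside = x + dx >= 0 and x + dx < W and y + dy >= 0 and y + dy < H
--         s <<= 1
--         s |= image[y + dy][x + dx] if is_inside else back
--     return algo[s]
--
-- def enhance(image, algo, steps):
--     back = 0
--     for step in range(steps):
--         W, H = len(image[0]), len(image)
--         output = [
--             [get_output(x, y, back, image, algo) for x in range(-1, W + 1)]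
--             for y in range(-1, H + 1)
--         ]
--         back = algo[0] if back == 0 else algo[-1]
--         image = output
--     return image, back
--
-- def count_lit_pixels(image):
--     return sum(map(sum, image))
--
-- def solve(indata, steps):
--     algo_str, image_str = indata.split("\n\n")
--     algo_str = algo_str.replace("\n", "")
--     image_str = image_str.split("\n")
--
--     algo = [1 if c == "#" else 0 for c in algo_str]
--     W, H = len(image_str[0]), len(image_str)
--
--     image = [[1 if image_str[y][x] == "#" else 0 for x in range(W)] for y in range(H)]
--
--     output, back = enhance(image, algo, steps)
--
--     assert back == 0
--
--     return count_lit_pixels(output)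
-- ===== SOURCE B (Python) =====
-- def solve(indata, steps):
--     algo_str, image_str = indata.split("\n\n")
--     rows = image_str.split("\n")
--     algo = [1 if c == "#" else 0 for c in algo_str.replace("\n", "")]
--     W, H = len(rows[0]), len(rows)
--     grid = [[1 if rows[y][x] == "#" else 0 for x in range(W)] for y in range(H)]
--
--     back = 0
--     for _ in range(steps):
--         W, H = len(grid[0]), len(grid)
--
--         def v(x, y):
--             return grid[y][x] if 0 <= x < W and 0 <= y < H else back
--
--         # stage 1 (horizontal pass): 3-bit window code of each row position,
--         # computed once and reused by the three output rows that need it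
--         hg = [[4 * v(x - 1, y) + 2 * v(x, y) + v(x + 1, y)
--                for x in range(-1, W + 1)]
--               for y in range(-1, H + 1)]
--         bh = 7 * back  # horizontal code of a pure-background row
--
--         def h(y, x):
--             return hg[y + 1][x + 1] if -1 <= y <= H else bh
--
--         # stage 2 (vertical pass): stack three horizontal codes into the 9-bit index
--         grid = [[algo[64 * h(y - 1, x) + 8 * h(y, x) + h(y + 1, x)]
--                  for x in range(-1, W + 1)]
--                 for y in range(-1, H + 1)]
--         back = algo[0] if back == 0 else algo[511]
--
--     assert back == 0
--     return sum(map(sum, grid))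
-- ===== Notes on version B (the rewrite author's own statement) =====
-- stated objective: alternative
-- what changed: B replaces A's per-output-cell loop over the 9 neighbors (with i%3/i//3 offsets and bit shifting) by a separable two-stage convolution: a horizontal pass materializes the 3-bit window code of every row position once, and a vertical pass stacks three such codes into the 9-bit index, so each horizontal code is reused by the three output rows that need it.
-- outside the precondition, e.g. on solve('.\n\n.', 1): A returns 0, B returns 0
import Mathlib
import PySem

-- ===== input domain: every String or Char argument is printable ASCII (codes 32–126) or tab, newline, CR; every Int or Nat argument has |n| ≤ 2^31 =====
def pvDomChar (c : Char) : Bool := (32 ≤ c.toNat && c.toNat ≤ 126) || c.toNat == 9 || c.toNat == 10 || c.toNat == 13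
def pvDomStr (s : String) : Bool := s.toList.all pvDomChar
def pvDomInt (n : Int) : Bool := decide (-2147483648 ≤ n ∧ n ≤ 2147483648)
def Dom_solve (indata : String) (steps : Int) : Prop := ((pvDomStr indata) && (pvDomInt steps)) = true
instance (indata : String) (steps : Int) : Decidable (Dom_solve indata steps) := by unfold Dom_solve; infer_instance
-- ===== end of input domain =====

-- B replaces A's per-cell 9-point neighborhood loop by a separable two-stage pass
-- (horizontal 3-bit window codes computed once per row position, then stacked vertically);
-- objective: alternative decomposition, not claimed faster.

-- ===== PORT A =====
def get_output (x y back : Int) (image : List (List Int)) (algo : List Int) : Int :=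
  -- W, H = len(image[0]), len(image)   (image[0]: Pre_solve keeps image nonempty)
  let W : Int := (((PySem.List.pyGet? image 0).getD []).length : Int)
  let H : Int := (image.length : Int)
  let s := (PySem.List.pyRange 0 9 1).foldl (fun s i =>
    let dx := PySem.Int.mod i 3 - 1
    let dy := PySem.Int.floordiv i 3 - 1
    let isInside := 0 ≤ x + dx ∧ x + dx < W ∧ 0 ≤ y + dy ∧ y + dy < H
    -- s <<= 1; s |= v : equals s * 2 + v here because s ≥ 0 and every v ored in is a 0/1 bit
    s * 2 + (if isInside then PySem.List.pyGetD (PySem.List.pyGetD image (y + dy) []) (x + dx) 0 else back)) 0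
  PySem.List.pyGetD algo s 0

-- body of enhance's per-step loop
def stepA (algo : List Int) (st : List (List Int) × Int) : List (List Int) × Int :=
  let image := st.1
  let back := st.2
  let W : Int := (((PySem.List.pyGet? image 0).getD []).length : Int)
  let H : Int := (image.length : Int)
  let output := (PySem.List.pyRange (-1) (H + 1) 1).map (fun y =>
    (PySem.List.pyRange (-1) (W + 1) 1).map (fun x => get_output x y back image algo))
  (output, if back = 0 then PySem.List.pyGetD algo 0 0 else PySem.List.pyGetD algo (-1) 0)

def enhance (image : List (List Int)) (algo : List Int) (steps : Int) : List (List Int) × Int :=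
  (PySem.List.pyRange 0 steps 1).foldl (fun st _ => stepA algo st) (image, 0)

def count_lit_pixels (image : List (List Int)) : Int :=
  (image.map (fun r => r.sum)).sum

def solve (indata : String) (steps : Int) : Int :=
  let parts := (PySem.Str.split? indata "\n\n").getD []   -- sep ≠ "" so split? never returns none
  -- algo_str, image_str = …  (Pre_solve gives parts.length = 2)
  let algoStr := PySem.Str.replace (PySem.List.pyGetD parts 0 "") "\n" ""
  let rows := (PySem.Str.split? (PySem.List.pyGetD parts 1 "") "\n").getD []
  let algo := algoStr.toList.map (fun c => if c = '#' then (1 : Int) else 0)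
  let W : Int := PySem.Str.len (PySem.List.pyGetD rows 0 "")
  let H : Int := PySem.List.len rows
  let image := (PySem.List.pyRange 0 H 1).map (fun y =>
    (PySem.List.pyRange 0 W 1).map (fun x =>
      if (PySem.Str.pyGet? (PySem.List.pyGetD rows y "") x).getD ' ' = '#' then (1 : Int) else 0))
  let ob := enhance image algo steps
  -- assert back == 0 : Pre_solve restricts to inputs on which the assert passes
  count_lit_pixels ob.1

-- ===== PORT B =====
-- v(x, y): bounds-checked read of the grid, background outside
def vread (grid : List (List Int)) (back x y : Int) : Int :=
  if 0 ≤ x ∧ x < (((PySem.List.pyGet? grid 0).getD []).length : Int) ∧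
      0 ≤ y ∧ y < (grid.length : Int) then
    PySem.List.pyGetD (PySem.List.pyGetD grid y []) x 0
  else back

-- stage 1: the grid of horizontal 3-bit window codes (hg in Source B)
def mkHg (grid : List (List Int)) (back : Int) : List (List Int) :=
  let W : Int := (((PySem.List.pyGet? grid 0).getD []).length : Int)
  let H : Int := (grid.length : Int)
  (PySem.List.pyRange (-1) (H + 1) 1).map (fun y =>
    (PySem.List.pyRange (-1) (W + 1) 1).map (fun x =>
      4 * vread grid back (x - 1) y + 2 * vread grid back x y + vread grid back (x + 1) y))

-- h(y, x): read a horizontal code, the all-background code bh outside the computed band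
def hread (hg : List (List Int)) (bh H y x : Int) : Int :=
  if -1 ≤ y ∧ y ≤ H then PySem.List.pyGetD (PySem.List.pyGetD hg (y + 1) []) (x + 1) 0 else bh

-- body of B's per-step loop: horizontal pass, then vertical stacking
def stepB (algo : List Int) (st : List (List Int) × Int) : List (List Int) × Int :=
  let grid := st.1
  let back := st.2
  let W : Int := (((PySem.List.pyGet? grid 0).getD []).length : Int)
  let H : Int := (grid.length : Int)
  let hg := mkHg grid back
  let bh := 7 * back
  let grid2 := (PySem.List.pyRange (-1) (H + 1) 1).map (fun y =>
    (PySem.List.pyRange (-1) (W + 1) 1).map (fun x =>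
      PySem.List.pyGetD algo
        (64 * hread hg bh H (y - 1) x + 8 * hread hg bh H y x + hread hg bh H (y + 1) x) 0))
  (grid2, if back = 0 then PySem.List.pyGetD algo 0 0 else PySem.List.pyGetD algo 511 0)

def solve_alt (indata : String) (steps : Int) : Int :=
  let parts := (PySem.Str.split? indata "\n\n").getD []
  let algoStr := PySem.Str.replace (PySem.List.pyGetD parts 0 "") "\n" ""
  let rows := (PySem.Str.split? (PySem.List.pyGetD parts 1 "") "\n").getD []
  let algo := algoStr.toList.map (fun c => if c = '#' then (1 : Int) else 0)
  let W : Int := PySem.Str.len (PySem.List.pyGetD rows 0 "")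
  let H : Int := PySem.List.len rows
  let grid0 := (PySem.List.pyRange 0 H 1).map (fun y =>
    (PySem.List.pyRange 0 W 1).map (fun x =>
      if (PySem.Str.pyGet? (PySem.List.pyGetD rows y "") x).getD ' ' = '#' then (1 : Int) else 0))
  let st := (PySem.List.pyRange 0 steps 1).foldl (fun st _ => stepB algo st) (grid0, 0)
  -- assert back == 0 passes under Pre_solve
  (st.1.map (fun r => r.sum)).sum

-- ===== PRECONDITION & SPEC =====
-- Pre_solve admits exactly the well-formed puzzle inputs on which A returns: one blank-line
-- separator, no image row shorter than the first row (A raises IndexError otherwise), and,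
-- when steps > 0, a 512-character enhancement algorithm whose background stays dark (A's
-- assert fails otherwise).  This excludes degenerate inputs whose algorithm string has a
-- length other than 512 on which A happens to return because no out-of-range lookup occurs.
def Pre_solve (indata : String) (steps : Int) : Prop :=
  let parts := (PySem.Str.split? indata "\n\n").getD []
  let algoS := (PySem.Str.replace (PySem.List.pyGetD parts 0 "") "\n" "").toList
  let rows := (PySem.Str.split? (PySem.List.pyGetD parts 1 "") "\n").getD []
  parts.length = 2 ∧
  (∀ r ∈ rows, (PySem.List.pyGetD rows 0 "").toList.length ≤ r.toList.length) ∧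
  (steps ≤ 0 ∨
    (algoS.length = 512 ∧
      (algoS.getD 0 ' ' ≠ '#' ∨ (algoS.getD 511 ' ' ≠ '#' ∧ (2 : Int) ∣ steps))))
instance (indata : String) (steps : Int) : Decidable (Pre_solve indata steps) := by
  unfold Pre_solve; infer_instance

def pvWitness_solve : String × Int := ("#\n\n#", 0)

def Spec_solve (indata : String) (steps : Int) (out : Int) : Prop := out = solve_alt indata steps
instance (indata : String) (steps : Int) (out : Int) : Decidable (Spec_solve indata steps out) := by
  unfold Spec_solve; infer_instance

-- ===== CLAIM (what is proved, stated in full; the proofs are below) =====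
def Claim_equal_solve : Prop := ∀ (indata : String) (steps : Int), Dom_solve indata steps → Pre_solve indata steps → Spec_solve indata steps (solve indata steps)

-- ===== LEMMAS AND PROOFS =====

theorem pyRange_map_getD {α : Type} (aa b : Int) (f : Int → α) (d : α) (j : Nat)
    (hj : (j : Int) < b - aa) :
    ((PySem.List.pyRange aa b 1).map f).getD j d = f (aa + j) := by
  rw [PySem.List.pyRange_one, List.map_map]
  rw [List.getD_eq_getElem _ d (by simp; omega)]
  simp

-- A's inner 9-iteration fold, written as the weighted sum of the nine bounds-checked reads
theorem get_output_closed (x y back : Int) (image : List (List Int)) (algo : List Int) :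
    get_output x y back image algo =
      PySem.List.pyGetD algo
        (256 * vread image back (x + -1) (y + -1) + 128 * vread image back (x + 0) (y + -1) +
          64 * vread image back (x + 1) (y + -1) + 32 * vread image back (x + -1) (y + 0) +
          16 * vread image back (x + 0) (y + 0) + 8 * vread image back (x + 1) (y + 0) +
          4 * vread image back (x + -1) (y + 1) + 2 * vread image back (x + 0) (y + 1) +
          vread image back (x + 1) (y + 1)) 0 := by
  have hr : PySem.List.pyRange 0 9 1 = [0, 1, 2, 3, 4, 5, 6, 7, 8] := by decide
  have m0 : PySem.Int.mod (0:Int) 3 - 1 = -1 := by decide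
  have m1 : PySem.Int.mod (1:Int) 3 - 1 = 0 := by decide
  have m2 : PySem.Int.mod (2:Int) 3 - 1 = 1 := by decide
  have m3 : PySem.Int.mod (3:Int) 3 - 1 = -1 := by decide
  have m4 : PySem.Int.mod (4:Int) 3 - 1 = 0 := by decide
  have m5 : PySem.Int.mod (5:Int) 3 - 1 = 1 := by decide
  have m6 : PySem.Int.mod (6:Int) 3 - 1 = -1 := by decide
  have m7 : PySem.Int.mod (7:Int) 3 - 1 = 0 := by decide
  have m8 : PySem.Int.mod (8:Int) 3 - 1 = 1 := by decide
  have f0 : PySem.Int.floordiv (0:Int) 3 - 1 = -1 := by decide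
  have f1 : PySem.Int.floordiv (1:Int) 3 - 1 = -1 := by decide
  have f2 : PySem.Int.floordiv (2:Int) 3 - 1 = -1 := by decide
  have f3 : PySem.Int.floordiv (3:Int) 3 - 1 = 0 := by decide
  have f4 : PySem.Int.floordiv (4:Int) 3 - 1 = 0 := by decide
  have f5 : PySem.Int.floordiv (5:Int) 3 - 1 = 0 := by decide
  have f6 : PySem.Int.floordiv (6:Int) 3 - 1 = 1 := by decide
  have f7 : PySem.Int.floordiv (7:Int) 3 - 1 = 1 := by decide
  have f8 : PySem.Int.floordiv (8:Int) 3 - 1 = 1 := by decide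
  unfold get_output
  rw [hr]
  simp only [List.foldl, m0, m1, m2, m3, m4, m5, m6, m7, m8,
    f0, f1, f2, f3, f4, f5, f6, f7, f8, vread]
  congr 1
  ring

-- a horizontal-code read equals the weighted sum of its three grid reads
theorem hread_eq (grid : List (List Int)) (back y x : Int)
    (hx1 : -1 ≤ x) (hx2 : x ≤ (((PySem.List.pyGet? grid 0).getD []).length : Int)) :
    hread (mkHg grid back) (7 * back) (grid.length : Int) y x =
      4 * vread grid back (x - 1) y + 2 * vread grid back x y + vread grid back (x + 1) y := by
  unfold hread
  by_cases hy : -1 ≤ y ∧ y ≤ (grid.length : Int)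
  · rw [if_pos hy]
    have hrow : PySem.List.pyGetD (mkHg grid back) (y + 1) [] =
        (PySem.List.pyRange (-1) ((((PySem.List.pyGet? grid 0).getD []).length : Int) + 1) 1).map
          (fun x => 4 * vread grid back (x - 1) y + 2 * vread grid back x y +
            vread grid back (x + 1) y) := by
      simp only [mkHg]
      rw [PySem.List.pyGetD_of_nonneg _ _ (show (0:Int) ≤ y + 1 by omega)]
      rw [pyRange_map_getD (-1) ((grid.length : Int) + 1) _ [] (y + 1).toNat (by omega)]
      rw [show -1 + (((y + 1).toNat : Nat) : Int) = y by omega]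
    rw [hrow]
    rw [PySem.List.pyGetD_of_nonneg _ _ (show (0:Int) ≤ x + 1 by omega)]
    rw [pyRange_map_getD (-1) ((((PySem.List.pyGet? grid 0).getD []).length : Int) + 1) _ 0
      (x + 1).toNat (by omega)]
    rw [show -1 + (((x + 1).toNat : Nat) : Int) = x by omega]
  · rw [if_neg hy]
    have hv : ∀ u : Int, vread grid back u y = back := by
      intro u
      unfold vread
      rw [if_neg (by omega)]
    rw [hv, hv, hv]
    ring

-- the two per-step loop bodies agree (algo has its 512 entries, so algo[-1] = algo[511])
theorem step_eq (algo : List Int) (halgo : algo.length = 512) (st : List (List Int) × Int) :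
    stepA algo st = stepB algo st := by
  simp only [stepA, stepB, Prod.mk.injEq]
  refine ⟨?_, ?_⟩
  · apply List.map_congr_left
    intro y hy
    rw [PySem.List.mem_pyRange_one] at hy
    apply List.map_congr_left
    intro x hx
    rw [PySem.List.mem_pyRange_one] at hx
    rw [get_output_closed]
    simp only [show ∀ u : Int, u + -1 = u - 1 from fun u => by ring,
      show ∀ u : Int, u + 0 = u from fun u => add_zero u]
    rw [hread_eq st.1 st.2 (y - 1) x (by omega) (by omega),
      hread_eq st.1 st.2 y x (by omega) (by omega),
      hread_eq st.1 st.2 (y + 1) x (by omega) (by omega)]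
    congr 1
    ring
  · have h1 : PySem.List.pyGetD algo (-1) 0 = algo[algo.length - 1]'(by omega) :=
      PySem.List.pyGetD_neg_ofNat algo 1 0 (by omega) (by omega)
    have h2 : PySem.List.pyGetD algo 511 0 = algo[(511 : Nat)]'(by omega) := by
      rw [PySem.List.pyGetD_ofNat' algo 511 0, List.getD_eq_getElem _ _ (by omega)]
    rw [h1, h2]
    congr 2
    omega

theorem fold_eq (algo : List Int) (steps : Int) (init : List (List Int) × Int)
    (h : steps ≤ 0 ∨ algo.length = 512) :
    (PySem.List.pyRange 0 steps 1).foldl (fun st _ => stepA algo st) init =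
      (PySem.List.pyRange 0 steps 1).foldl (fun st _ => stepB algo st) init := by
  rcases h with hs | halgo
  · have : PySem.List.pyRange 0 steps 1 = [] := by
      apply List.eq_nil_of_length_eq_zero
      rw [PySem.List.length_pyRange_one]
      omega
    rw [this]
    rfl
  · have he : (fun (st : List (List Int) × Int) (_ : Int) => stepA algo st) =
        fun st _ => stepB algo st :=
      funext fun st => funext fun _ => step_eq algo halgo st
    rw [he]

-- ===== VERDICT (by name: the statement is the Claim_ definition above) =====
theorem solve_spec : Claim_equal_solve := by
  intro indata steps hdom hpre
  obtain ⟨hp2, hrows, hcase⟩ := hpre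
  unfold Spec_solve solve solve_alt enhance count_lit_pixels
  simp only []
  rw [fold_eq]
  rcases hcase with hs | ⟨h512, _⟩
  · exact Or.inl hs
  · right
    rw [List.length_map]
    exact h512
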